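-- pv_equiv track=rewrite | github.com/Tiboris/IPP-mka | mka.py | invalid_rules
-- ===== SOURCE A (Python) =====
-- def invalid_rules(rules,states,alphabet):
--     for r in rules:
--         if (r not in states):
--             return True
--         rule = rules[r]
--         for a in rule:
--             if (a not in alphabet):
--                 return True
--             if (rule[a] not in states):
--                 return True
--     return False
-- ===== SOURCE B (Python) =====
-- def invalid_rules(rules, states, alphabet):
--     keys = set(rules)
--     symbols = set()
--     targets = set()
--     for rule in rules.values():
--         symbols |= set(rule)
--         targets |= set(rule.values())
--     return not (keys <= set(states)
--                 and symbols <= set(alphabet)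
--                 and targets <= set(states))
-- ===== Notes on version B (the rewrite author's own statement) =====
-- stated objective: simpler
-- what changed: Replaces the nested early-exit membership loops with a gather-then-compare pass: build the set of rule keys, the union of all transition symbols and the union of all targets, then return True iff any of the three is not a subset of states/alphabet/states.
import Mathlib
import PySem

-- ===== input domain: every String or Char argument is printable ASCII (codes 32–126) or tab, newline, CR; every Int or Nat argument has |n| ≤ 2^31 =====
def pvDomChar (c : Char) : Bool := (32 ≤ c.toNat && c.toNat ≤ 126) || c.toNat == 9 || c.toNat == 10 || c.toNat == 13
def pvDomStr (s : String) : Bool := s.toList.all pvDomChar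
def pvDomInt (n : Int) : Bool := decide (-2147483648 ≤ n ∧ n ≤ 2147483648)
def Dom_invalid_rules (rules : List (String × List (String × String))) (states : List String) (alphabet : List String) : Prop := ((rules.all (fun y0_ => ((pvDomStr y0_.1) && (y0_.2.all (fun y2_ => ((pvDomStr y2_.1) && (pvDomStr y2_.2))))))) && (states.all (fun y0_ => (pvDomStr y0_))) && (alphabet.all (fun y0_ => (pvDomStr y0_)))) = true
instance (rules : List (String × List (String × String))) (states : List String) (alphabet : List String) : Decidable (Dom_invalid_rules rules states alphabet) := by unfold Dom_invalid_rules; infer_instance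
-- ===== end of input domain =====

-- B replaces A's nested early-exit membership loops with a single gather-then-compare
-- pass (rule keys / transition symbols / targets as sets, then three subset tests); objective: simpler.
-- The 'rules' dict (of dicts) arrives as an association list; PySem.Dict.ofList reproduces
-- Python dict construction (last value wins, first-insertion key order), and iterating a
-- dict visits its items, where 'rules[r]' / 'rule[a]' is exactly the paired value.

-- ===== PORT A =====
-- inner loop of A: 'for a in rule: if a not in alphabet: return True; if rule[a] not in states: return True'
def pvCheckRule (alphabet states : List String) : List (String × String) → Bool
  | [] => false
  | (a, t) :: rest =>
      if !(alphabet.contains a) then true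
      else if !(states.contains t) then true
      else pvCheckRule alphabet states rest

-- outer loop of A over the items of the rules dict
def pvLoopA (states alphabet : List String) : List (String × List (String × String)) → Bool
  | [] => false
  | (r, rv) :: rest =>
      if !(states.contains r) then true
      else if pvCheckRule alphabet states (PySem.Dict.ofList rv).items then true
      else pvLoopA states alphabet rest

def invalid_rules (rules : List (String × List (String × String))) (states : List String) (alphabet : List String) : Bool :=
  pvLoopA states alphabet (PySem.Dict.ofList rules).items

-- ===== PORT B =====
def invalid_rules_alt (rules : List (String × List (String × String))) (states : List String) (alphabet : List String) : Bool :=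
  let d := PySem.Dict.ofList rules
  let keys : PySem.Set String := PySem.Set.ofList d.keys
  let st := d.values.foldl
      (fun (p : PySem.Set String × PySem.Set String) rv =>
        let rd := PySem.Dict.ofList rv
        (p.1.union (PySem.Set.ofList rd.keys), p.2.union (PySem.Set.ofList rd.values)))
      (PySem.Set.empty, PySem.Set.empty)
  !(keys.issubset (PySem.Set.ofList states) &&
    st.1.issubset (PySem.Set.ofList alphabet) &&
    st.2.issubset (PySem.Set.ofList states))

-- ===== PRECONDITION & SPEC =====
def Spec_invalid_rules (rules : List (String × List (String × String))) (states : List String) (alphabet : List String) (out : Bool) : Prop := out = invalid_rules_alt rules states alphabet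
instance (rules : List (String × List (String × String))) (states : List String) (alphabet : List String) (out : Bool) : Decidable (Spec_invalid_rules rules states alphabet out) := by unfold Spec_invalid_rules; infer_instance

-- ===== CLAIM (what is proved, stated in full; the proofs are below) =====
def Claim_equal_invalid_rules : Prop := ∀ (rules : List (String × List (String × String))) (states : List String) (alphabet : List String), Dom_invalid_rules rules states alphabet → Spec_invalid_rules rules states alphabet (invalid_rules rules states alphabet)

-- ===== LEMMAS AND PROOFS =====

theorem pvLoopA_cons (states alphabet : List String) (r : String) (rv : List (String × String)) (tl : List (String × List (String × String))) :
    pvLoopA states alphabet ((r, rv) :: tl) =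
      (!(states.contains r) || pvCheckRule alphabet states (PySem.Dict.ofList rv).items
        || pvLoopA states alphabet tl) := by
  show (if _ then _ else _) = _
  by_cases h1 : states.contains r <;>
    by_cases h2 : pvCheckRule alphabet states (PySem.Dict.ofList rv).items <;>
      simp [h2]

theorem pvCheckRule_iff (alphabet states : List String) (l : List (String × String)) :
    pvCheckRule alphabet states l = true ↔ ∃ p ∈ l, p.1 ∉ alphabet ∨ p.2 ∉ states := by
  induction l with
  | nil => simp [pvCheckRule]
  | cons hd tl ih =>
      obtain ⟨a, t⟩ := hd
      show (if _ then _ else _) = true ↔ _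
      by_cases ha : a ∈ alphabet <;> by_cases ht : t ∈ states <;>
        simp [ha, ht, ih, List.mem_cons, exists_eq_or_imp]

theorem pvLoopA_iff (states alphabet : List String) (l : List (String × List (String × String))) :
    pvLoopA states alphabet l = true ↔
      ∃ x ∈ l, x.1 ∉ states ∨
        ∃ p ∈ (PySem.Dict.ofList x.2).items, p.1 ∉ alphabet ∨ p.2 ∉ states := by
  induction l with
  | nil => simp [pvLoopA]
  | cons hd tl ih =>
      obtain ⟨r, rv⟩ := hd
      rw [pvLoopA_cons]
      simp only [Bool.or_eq_true, ih, pvCheckRule_iff, List.mem_cons, exists_eq_or_imp,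
        Bool.not_eq_true', List.contains_eq_mem, decide_eq_false_iff_not]

theorem pvFoldUnion_mem {α : Type} [BEq α] [LawfulBEq α] {β : Type}
    (g : β → List α) (l : List β) (init : PySem.Set α) (y : α) :
    y ∈ l.foldl (fun s rv => s.union (PySem.Set.ofList (g rv))) init ↔
      y ∈ init ∨ ∃ rv ∈ l, y ∈ g rv := by
  induction l generalizing init with
  | nil => simp
  | cons hd tl ih =>
      simp only [List.foldl_cons, ih, PySem.Set.mem_union, PySem.Set.mem_ofList,
        List.mem_cons, exists_eq_or_imp]
      tauto

-- ===== VERDICT (by name: the statement is the Claim_ definition above) =====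
theorem invalid_rules_spec : Claim_equal_invalid_rules := by
  intro rules states alphabet _
  unfold Spec_invalid_rules
  rw [Bool.eq_iff_iff]
  simp only [invalid_rules, invalid_rules_alt]
  rw [PySem.List.foldl_prod_mk
    (f := fun (s : PySem.Set String) rv => s.union (PySem.Set.ofList (PySem.Dict.ofList rv).keys))
    (g := fun (s : PySem.Set String) rv => s.union (PySem.Set.ofList (PySem.Dict.ofList rv).values))]
  rw [pvLoopA_iff]
  simp only [Bool.not_eq_true', Bool.and_eq_true_iff,
    Bool.eq_false_iff, ne_eq, PySem.Set.issubset_iff, PySem.Set.mem_ofList,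
    pvFoldUnion_mem, PySem.Set.empty, List.not_mem_nil, false_or, PySem.Dict.keys,
    PySem.Dict.values, List.mem_map, forall_exists_index, and_imp]
  simp only [forall_apply_eq_imp_iff₂]
  constructor
  · rintro ⟨x, hx, h⟩ ⟨⟨h1, h2⟩, h3⟩
    rcases h with h | ⟨p, hp, h⟩
    · exact h (h1 x hx)
    · rcases h with h | h
      · exact h (h2 p.1 x hx p hp rfl)
      · exact h (h3 p.2 x hx p hp rfl)
  · intro h
    by_contra hno
    push Not at hno
    exact h ⟨⟨fun a ha => (hno a ha).1,
      fun y a ha p hp hpy => hpy ▸ ((hno a ha).2 p hp).1⟩,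
      fun y a ha p hp hpy => hpy ▸ ((hno a ha).2 p hp).2⟩
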